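-- pv_equiv track=rewrite | github.com/rofeleo/ADS-spring-2024 | calc/egyptian_number_system.py | dec_converter_to_egyptian
-- ===== SOURCE A (Python) =====
-- words_values = {'I': 1, '^': 10, 'P': 100, '?': 1000, '!': 10000, 'J': 100000, 'H': 1000000} #Словарь египт. СС(слово : значение)
--
-- def dec_converter_to_egyptian(num: int):
--     result = ''
--     str_number = str(num)
--     if '.' in str_number: #проверка на дробное число
--         integer_part, decimal_part = str_number.split('.')
--         if decimal_part == '0':
--             num2 = int(integer_part)
--             temp_num = num2
--             value_index = 1
--             while temp_num > 0:
--                 temp = temp_num % 10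
--                 temp_num //= 10
--                 for i in range(temp):
--                     result += list(words_values.keys())[list(words_values.values()).index(value_index)]
--                 value_index *= 10
--
--             if result == '':
--                 return '0'
--             else:
--                 return result[::-1]
--         else:
--             return 'Ошибка'
--     else: #перевод целого числа
--         result = ''
--         temp_num = num
--         value_index = 1
--
--         while temp_num > 0:
--             temp = temp_num % 10
--             temp_num //= 10
--             for i in range(temp):
--                 result += list(words_values.keys())[list(words_values.values()).index(value_index)]
--             value_index *= 10
--
--         if result == '':
--             return '0'
--         else:
--             return result[::-1]
-- ===== SOURCE B (Python) =====
-- words_values = {'I': 1, '^': 10, 'P': 100, '?': 1000, '!': 10000, 'J': 100000, 'H': 1000000}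
--
-- def dec_converter_to_egyptian(num: int):
--     # Greedy most-significant-first: one divmod per symbol value, no digit peeling, no reversal.
--     if num <= 0:
--         return '0'
--     result = ''
--     rest = num
--     for symbol, value in sorted(words_values.items(), key=lambda kv: kv[1], reverse=True):
--         result += symbol * (rest // value)
--         rest %= value
--     return result
-- ===== Notes on version B (the rewrite author's own statement) =====
-- stated objective: alternative
-- what changed: Replaces the LSB-first mod/div digit-peeling loop with its per-digit list .index symbol lookup and final string reversal by a single greedy most-significant-first pass: one floordiv/mod per symbol value, direct symbol access, no reversal.
import Mathlib
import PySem

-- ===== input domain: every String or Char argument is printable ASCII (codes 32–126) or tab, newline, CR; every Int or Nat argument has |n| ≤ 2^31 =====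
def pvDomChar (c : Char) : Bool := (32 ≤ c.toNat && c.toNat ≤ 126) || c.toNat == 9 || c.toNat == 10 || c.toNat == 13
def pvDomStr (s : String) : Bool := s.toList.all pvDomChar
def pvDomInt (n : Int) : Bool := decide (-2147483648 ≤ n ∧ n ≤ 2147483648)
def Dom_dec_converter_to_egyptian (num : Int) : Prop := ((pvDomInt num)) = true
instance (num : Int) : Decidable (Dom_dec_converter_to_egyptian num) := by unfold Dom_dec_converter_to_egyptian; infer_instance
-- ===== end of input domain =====

-- B replaces A's LSB-first digit peeling + per-digit .index lookup + final reversal by one greedy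
-- most-significant-first divmod pass over the symbol values (objective: alternative decomposition).

-- ===== PORT A =====
-- words_values keys and values, in dict insertion order
def pvKeysA : List Char := ['I', '^', 'P', '?', '!', 'J', 'H']
def pvValsA : List Int := [1, 10, 100, 1000, 10000, 100000, 1000000]

-- the while-loop of A: result += symbol for each of (temp_num % 10) copies, temp_num //= 10, value_index *= 10
def pvLoopA (temp_num value_index : Int) (result : List Char) : List Char :=
  if h : temp_num > 0 then
    let temp := PySem.Int.mod temp_num 10
    -- list(words_values.keys())[list(words_values.values()).index(value_index)]
    -- where .index finds no match Python raises ValueError (excluded by Pre_); the port yields ' ' there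
    let sym : Char :=
      match PySem.List.index? pvValsA value_index with
      | some j => (PySem.List.pyGet? pvKeysA (j : Int)).getD ' '
      | none => ' '
    pvLoopA (PySem.Int.floordiv temp_num 10) (value_index * 10)
      (result ++ List.replicate temp.toNat sym)   -- for i in range(temp): result += sym
  else result
termination_by temp_num.toNat
decreasing_by
  have h1 : PySem.Int.floordiv temp_num 10 = temp_num / 10 :=
    PySem.Int.floordiv_eq_ediv_of_pos (by omega)
  omega

def dec_converter_to_egyptian (num : Int) : String :=
  let str_number := PySem.Int.toChars num   -- str(num)
  if '.' ∈ str_number then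
    -- fractional branch: unreachable for an int argument (str(int) never contains '.');
    -- ported by hand step for step, with the port yielding "" where Python's unpack/int() would raise
    match str_number.splitOn '.' with
    | [integer_part, decimal_part] =>
      if decimal_part = ['0'] then
        match PySem.Int.ofStr? (String.ofList integer_part) with
        | some num2 =>
          let result := pvLoopA num2 1 []
          if result = [] then "0" else String.ofList result.reverse   -- result[::-1]
        | none => ""
      else "Ошибка"
    | _ => ""
  else
    let result := pvLoopA num 1 []
    if result = [] then "0" else String.ofList result.reverse   -- result[::-1]

-- ===== PORT B =====
-- words_values.items() in insertion order
def pvItemsB : List (Char × Int) :=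
  [('I', 1), ('^', 10), ('P', 100), ('?', 1000), ('!', 10000), ('J', 100000), ('H', 1000000)]

def dec_converter_to_egyptian_alt (num : Int) : String :=
  if num ≤ 0 then "0"
  else
    -- for symbol, value in sorted(words_values.items(), key=lambda kv: kv[1], reverse=True):
    --     result += symbol * (rest // value); rest %= value
    let pairs := PySem.List.sorted pvItemsB (fun kv => kv.2) true
    let st := pairs.foldl
      (fun (acc : List Char × Int) kv =>
        (acc.1 ++ List.replicate (PySem.Int.floordiv acc.2 kv.2).toNat kv.1,
         PySem.Int.mod acc.2 kv.2))
      ([], num)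
    String.ofList st.1

-- ===== PRECONDITION & SPEC =====
-- Pre_ excludes exactly num ≥ 10^7, where A raises ValueError (value_index outgrows every dictionary value).
def Pre_dec_converter_to_egyptian (num : Int) : Prop := num < 10000000
instance (num : Int) : Decidable (Pre_dec_converter_to_egyptian num) := by
  unfold Pre_dec_converter_to_egyptian; infer_instance

def pvWitness_dec_converter_to_egyptian : Int := 2024

def Spec_dec_converter_to_egyptian (num : Int) (out : String) : Prop :=
  out = dec_converter_to_egyptian_alt num
instance (num : Int) (out : String) : Decidable (Spec_dec_converter_to_egyptian num out) := by
  unfold Spec_dec_converter_to_egyptian; infer_instance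

-- ===== CLAIM (what is proved, stated in full; the proofs are below) =====
def Claim_equal_dec_converter_to_egyptian : Prop :=
  ∀ (num : Int), Dom_dec_converter_to_egyptian num → Pre_dec_converter_to_egyptian num →
    Spec_dec_converter_to_egyptian num (dec_converter_to_egyptian num)

-- ===== LEMMAS AND PROOFS =====

-- symbol for decimal place k (k ≤ 6)
def pvSym (k : Nat) : Char := pvKeysA.getD k ' '

-- reference rendering, LSB recursion: digit j of n gets the symbol of place k+j, MSB first
def egyUp (k n : Nat) : List Char :=
  if h : n = 0 then []
  else egyUp (k + 1) (n / 10) ++ List.replicate (n % 10) (pvSym k)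
termination_by n
decreasing_by exact Nat.div_lt_self (Nat.pos_of_ne_zero h) (by omega)

-- reference rendering, MSB recursion: places j-1 … 0 (n < 10^j), MSB first
def egyShift : Nat → Nat → List Char
  | 0, _ => []
  | j + 1, n => List.replicate (n / 10 ^ j) (pvSym j) ++ egyShift j (n % 10 ^ j)

lemma egyUp_zero (k : Nat) : egyUp k 0 = [] := by
  rw [egyUp]
  simp

lemma egyUp_pos (k n : Nat) (h : n ≠ 0) :
    egyUp k n = egyUp (k + 1) (n / 10) ++ List.replicate (n % 10) (pvSym k) := by
  conv_lhs => rw [egyUp]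
  rw [dif_neg h]

lemma digitChar_ne_dot (d : Nat) : Nat.digitChar d ≠ '.' := by
  by_cases h : d < 16
  · interval_cases d <;> decide
  · unfold Nat.digitChar
    rw [if_neg (by omega), if_neg (by omega), if_neg (by omega), if_neg (by omega),
        if_neg (by omega), if_neg (by omega), if_neg (by omega), if_neg (by omega),
        if_neg (by omega), if_neg (by omega), if_neg (by omega), if_neg (by omega),
        if_neg (by omega), if_neg (by omega), if_neg (by omega), if_neg (by omega)]
    decide

lemma toDigitsCore_mem (f : Nat) : ∀ (n : Nat) (l : List Char) (c : Char),
    c ∈ Nat.toDigitsCore 10 f n l → c ∈ l ∨ ∃ d, c = Nat.digitChar d := by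
  induction f with
  | zero => intro n l c hc; exact Or.inl hc
  | succ f ih =>
    intro n l c hc
    simp only [Nat.toDigitsCore] at hc
    split at hc
    · rcases List.mem_cons.mp hc with h | h
      · exact Or.inr ⟨n % 10, h⟩
      · exact Or.inl h
    · rcases ih _ _ _ hc with h | h
      · rcases List.mem_cons.mp h with h' | h'
        · exact Or.inr ⟨n % 10, h'⟩
        · exact Or.inl h'
      · exact Or.inr h

lemma dot_not_mem_toDigits (x : Nat) : '.' ∉ Nat.toDigits 10 x := by
  intro hmem
  rcases toDigitsCore_mem _ _ _ _ hmem with h | ⟨d, hd⟩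
  · simp at h
  · exact digitChar_ne_dot d hd.symm

lemma dot_not_mem_toChars (num : Int) : '.' ∉ PySem.Int.toChars num := by
  intro hmem
  unfold PySem.Int.toChars at hmem
  split at hmem
  · rcases List.mem_cons.mp hmem with h | h
    · simp at h
    · exact dot_not_mem_toDigits _ h
  · exact dot_not_mem_toDigits _ hmem

lemma egyUp_ne_nil (k n : Nat) (hn : n ≠ 0) : egyUp k n ≠ [] := by
  induction n using Nat.strong_induction_on generalizing k with
  | _ n ih =>
    rw [egyUp_pos k n hn]
    intro h
    rcases List.append_eq_nil_iff.mp h with ⟨h1, h2⟩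
    have hm : n % 10 = 0 := by simpa using congrArg List.length h2
    have hdiv : n / 10 ≠ 0 := by omega
    exact ih (n / 10) (Nat.div_lt_self (Nat.pos_of_ne_zero hn) (by omega)) (k + 1) hdiv h1

-- peel the top digit: for n < 10^(j+1), egyUp k n starts with the place-(k+j) block
lemma egyUp_peel (j : Nat) : ∀ (k n : Nat), n < 10 ^ (j + 1) →
    egyUp k n = List.replicate (n / 10 ^ j) (pvSym (k + j)) ++ egyUp k (n % 10 ^ j) := by
  induction j with
  | zero =>
    intro k n hn
    by_cases h0 : n = 0
    · subst h0; simp [egyUp_zero]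
    · rw [egyUp_pos k n h0]
      have hdiv : n / 10 = 0 := Nat.div_eq_of_lt (by simpa using hn)
      have hmod : n % 10 = n := Nat.mod_eq_of_lt (by simpa using hn)
      simp [hdiv, hmod, egyUp_zero, Nat.mod_one]
  | succ j ih =>
    intro k n hn
    by_cases h0 : n = 0
    · subst h0; simp [egyUp_zero]
    rw [egyUp_pos k n h0]
    have hdivlt : n / 10 < 10 ^ (j + 1) := by
      rw [Nat.div_lt_iff_lt_mul (by omega)]
      calc n < 10 ^ (j + 2) := hn
        _ = 10 ^ (j + 1) * 10 := by ring
    rw [ih (k + 1) (n / 10) hdivlt]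
    have e1 : n / 10 / 10 ^ j = n / 10 ^ (j + 1) := by
      rw [Nat.div_div_eq_div_mul]
      congr 1
      ring
    have e2 : n / 10 % 10 ^ j = n % 10 ^ (j + 1) / 10 := by
      have h := Nat.mod_mul_right_div_self n 10 (10 ^ j)
      have h2 : 10 * 10 ^ j = 10 ^ (j + 1) := by ring
      rw [h2] at h
      omega
    have e3 : n % 10 = n % 10 ^ (j + 1) % 10 := by
      rw [Nat.mod_mod_of_dvd n ⟨10 ^ j, by ring⟩]
    have hadd : k + 1 + j = k + (j + 1) := by omega
    rw [e1, e2, e3, hadd]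
    by_cases hm0 : n % 10 ^ (j + 1) = 0
    · simp [hm0, egyUp_zero]
    · rw [egyUp_pos k (n % 10 ^ (j + 1)) hm0]
      simp [List.append_assoc]

-- the two references agree on n < 10^j
lemma egyUp_eq_egyShift (j : Nat) : ∀ (n : Nat), n < 10 ^ j → egyUp 0 n = egyShift j n := by
  induction j with
  | zero =>
    intro n hn
    have : n = 0 := by simpa using hn
    subst this
    simp [egyUp_zero, egyShift]
  | succ j ih =>
    intro n hn
    rw [egyShift, ← ih (n % 10 ^ j) (Nat.mod_lt _ (by positivity))]
    simpa using egyUp_peel j 0 n hn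

-- dictionary-lookup fact for one place k ≤ 6
lemma symLookup (k : Nat) (hk : k ≤ 6) :
    (match PySem.List.index? pvValsA ((10 : Int) ^ k) with
      | some j => (PySem.List.pyGet? pvKeysA (j : Int)).getD ' '
      | none => ' ') = pvSym k := by
  interval_cases k <;> decide

-- A's loop computes the reversed reference rendering
lemma loopA_eq (n : Nat) : ∀ (k : Nat) (res : List Char), k ≤ 7 → n < 10 ^ (7 - k) →
    pvLoopA (n : Int) ((10 : Int) ^ k) res = res ++ (egyUp k n).reverse := by
  induction n using Nat.strong_induction_on with
  | _ n ih =>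
    intro k res hk hn
    by_cases h0 : n = 0
    · subst h0
      rw [pvLoopA, dif_neg (by omega)]
      simp [egyUp_zero]
    · have hpos : (0 : Int) < (n : Int) := by exact_mod_cast Nat.pos_of_ne_zero h0
      have hk6 : k ≤ 6 := by
        by_contra hgt
        have hk7 : k = 7 := by omega
        subst hk7
        simp at hn
        omega
      rw [pvLoopA, dif_pos hpos]
      simp only [symLookup k hk6]
      have hmod : PySem.Int.mod (n : Int) 10 = ((n % 10 : Nat) : Int) := by
        exact_mod_cast PySem.Int.mod_natCast n 10
      have hdiv : PySem.Int.floordiv (n : Int) 10 = ((n / 10 : Nat) : Int) := by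
        exact_mod_cast PySem.Int.floordiv_natCast n 10
      have hvi : (10 : Int) ^ k * 10 = (10 : Int) ^ (k + 1) := by ring
      have hdivlt : n / 10 < 10 ^ (7 - (k + 1)) := by
        rw [Nat.div_lt_iff_lt_mul (by omega)]
        calc n < 10 ^ (7 - k) := hn
          _ = 10 ^ (7 - (k + 1)) * 10 := by
              rw [← pow_succ]
              congr 1
              omega
      rw [hmod, hdiv, hvi, Int.toNat_natCast,
        ih (n / 10) (Nat.div_lt_self (Nat.pos_of_ne_zero h0) (by omega)) (k + 1) _ (by omega) hdivlt]
      rw [egyUp_pos k n h0]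
      simp [List.reverse_append, List.append_assoc]

lemma altB_eq (m : Nat) (h0 : 0 < m) :
    dec_converter_to_egyptian_alt (m : Int) = String.ofList (egyShift 7 m) := by
  have hns : ¬ ((m : Int) ≤ 0) := by exact_mod_cast not_le.mpr h0
  have hsort : PySem.List.sorted pvItemsB (fun kv => kv.2) true =
      [('H', 1000000), ('J', 100000), ('!', 10000), ('?', 1000), ('P', 100), ('^', 10), ('I', 1)] := by
    decide
  have hf : ∀ (x v : Nat), PySem.Int.floordiv ((x : Nat) : Int) ((v : Nat) : Int) = ((x / v : Nat) : Int) :=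
    fun x v => PySem.Int.floordiv_natCast x v
  have hmo : ∀ (x v : Nat), PySem.Int.mod ((x : Nat) : Int) ((v : Nat) : Int) = ((x % v : Nat) : Int) :=
    fun x v => PySem.Int.mod_natCast x v
  unfold dec_converter_to_egyptian_alt
  rw [if_neg hns, hsort]
  simp only [List.foldl]
  have c6 : ((1000000 : Nat) : Int) = (1000000 : Int) := by norm_num
  have c5 : ((100000 : Nat) : Int) = (100000 : Int) := by norm_num
  have c4 : ((10000 : Nat) : Int) = (10000 : Int) := by norm_num
  have c3 : ((1000 : Nat) : Int) = (1000 : Int) := by norm_num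
  have c2 : ((100 : Nat) : Int) = (100 : Int) := by norm_num
  have c1 : ((10 : Nat) : Int) = (10 : Int) := by norm_num
  have c0 : ((1 : Nat) : Int) = (1 : Int) := by norm_num
  rw [← c6, hf m 1000000, hmo m 1000000,
      ← c5, hf _ 100000, hmo _ 100000,
      ← c4, hf _ 10000, hmo _ 10000,
      ← c3, hf _ 1000, hmo _ 1000,
      ← c2, hf _ 100, hmo _ 100,
      ← c1, hf _ 10, hmo _ 10,
      ← c0, hf _ 1]
  simp only [Int.toNat_natCast]
  congr 1
  simp [egyShift, pvSym, pvKeysA, List.append_assoc]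

lemma loopA_nonpos (num : Int) (h : num ≤ 0) : pvLoopA num 1 [] = [] := by
  rw [pvLoopA, dif_neg (by omega)]

-- ===== VERDICT (by name: the statement is the Claim_ definition above) =====
theorem dec_converter_to_egyptian_spec : Claim_equal_dec_converter_to_egyptian := by
  intro num _hdom hpre
  unfold Spec_dec_converter_to_egyptian
  unfold Pre_dec_converter_to_egyptian at hpre
  unfold dec_converter_to_egyptian
  rw [if_neg (dot_not_mem_toChars num)]
  by_cases h0 : num ≤ 0
  · rw [loopA_nonpos num h0]
    simp [dec_converter_to_egyptian_alt, h0]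
  · push_neg at h0
    obtain ⟨m, rfl⟩ : ∃ m : Nat, num = (m : Int) :=
      ⟨num.toNat, (Int.toNat_of_nonneg (by omega)).symm⟩
    have hm0 : 0 < m := by exact_mod_cast h0
    have hm : m < 10000000 := by exact_mod_cast hpre
    have hloop : pvLoopA (m : Int) 1 [] = (egyUp 0 m).reverse := by
      have h := loopA_eq m 0 [] (by omega) (by simpa using hm)
      simpa using h
    simp only [hloop]
    rw [if_neg (by simpa using egyUp_ne_nil 0 m (by omega))]
    rw [List.reverse_reverse, altB_eq m hm0,
        egyUp_eq_egyShift 7 m (by simpa using hm)]
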